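-- pv_equiv track=rewrite | github.com/trevormax-smith/advent_of_code | 2018/day05.py | reduce_polymer
-- ===== SOURCE A (Python) =====
-- def reduce_polymer(polymer):
--
--     while True:
--         pairs_to_remove = []
--         for unit1, unit2 in zip(polymer[:-1], polymer[1:]):
--             if (
--                 (unit1.islower() and unit1.upper() == unit2) or
--                 (unit1.isupper() and unit1.lower() == unit2)
--             ):
--                 pairs_to_remove.append(unit1 + unit2)
--
--         pairs_to_remove = set(pairs_to_remove)
--
--         reduced_polymer = polymer
--         for unit_pair in pairs_to_remove:
--             reduced_polymer = reduced_polymer.replace(unit_pair, '')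
--
--         if reduced_polymer == '' or reduced_polymer == polymer:
--             break
--         else:
--             polymer = reduced_polymer
--
--     return reduced_polymer
-- ===== SOURCE B (Python) =====
-- def _reacts(u1, u2):
--     return (
--         (u1.islower() and u1.upper() == u2) or
--         (u1.isupper() and u1.lower() == u2)
--     )
--
--
-- def reduce_polymer(polymer):
--     stack = []
--     for c in polymer:
--         if stack and _reacts(stack[-1], c):
--             stack.pop()
--         else:
--             stack.append(c)
--     return ''.join(stack)
-- ===== Notes on version B (the rewrite author's own statement) =====
-- stated objective: simpler
-- what changed: Replaced the repeated whole-string scan-and-replace passes (rebuild the pair list, str.replace for each pair, loop until a fixpoint) with a single left-to-right pass maintaining a stack that pops when the next unit reacts with the stack top.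
import Mathlib
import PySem

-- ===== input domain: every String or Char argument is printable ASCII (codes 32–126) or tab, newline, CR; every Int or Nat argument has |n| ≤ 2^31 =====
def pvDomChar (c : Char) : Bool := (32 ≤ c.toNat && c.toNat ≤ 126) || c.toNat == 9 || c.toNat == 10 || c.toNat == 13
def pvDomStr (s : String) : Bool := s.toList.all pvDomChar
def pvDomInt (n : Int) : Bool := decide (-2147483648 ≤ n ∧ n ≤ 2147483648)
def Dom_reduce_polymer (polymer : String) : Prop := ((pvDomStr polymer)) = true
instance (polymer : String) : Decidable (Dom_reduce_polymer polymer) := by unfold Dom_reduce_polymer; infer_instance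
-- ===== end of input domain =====

-- B replaces A's repeated scan-and-replace passes with a single left-to-right stack pass (same return value, proved below).

-- ===== PORT A =====
-- the reaction test A performs on a zipped pair (unit1.islower() and unit1.upper()==unit2) or (unit1.isupper() and unit1.lower()==unit2)
def pvReacts (u1 u2 : Char) : Bool :=
  (PySem.Chars.islower u1 && (PySem.Chars.upper [u1] == [u2])) ||
  (PySem.Chars.isupper u1 && (PySem.Chars.lower [u1] == [u2]))

-- pairs_to_remove list of one pass: for (u1,u2) in zip(polymer[:-1], polymer[1:]): if reacts: append u1+u2
def pvPairs (p : List Char) : List (List Char) :=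
  ((PySem.Chars.slice p none (some (-1))).zip (PySem.Chars.slice p (some 1) none)).foldl
    (fun acc u => if pvReacts u.1 u.2 then acc ++ [[u.1, u.2]] else acc) []

-- one pass: reduced = polymer; for pair in set(pairs): reduced = reduced.replace(pair, '')
def pvPass (p : List Char) : List Char :=
  (PySem.Set.ofList (pvPairs p)).foldl (fun reduced pr => PySem.Chars.replace reduced pr []) p

-- termination facts for A's while-loop: one pass either leaves the string unchanged or strictly shortens it
theorem pvReplaceGo_eq_or_lt (old : List Char) (hold : old ≠ []) :
    ∀ (fuel : Nat) (l acc : List Char),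
      PySem.Chars.replace.go old [] fuel l acc = acc.reverse ++ l ∨
      (PySem.Chars.replace.go old [] fuel l acc).length < acc.length + l.length := by
  intro fuel
  induction fuel with
  | zero => intro l acc; left; simp [PySem.Chars.replace.go]
  | succ n ih =>
    intro l acc
    match l with
    | [] => left; simp [PySem.Chars.replace.go]
    | c :: t =>
      rw [PySem.Chars.replace.go]
      by_cases hpre : old.isPrefixOf (c :: t) = true
      · simp only [hpre, if_true]
        right
        have hone : 1 ≤ old.length := by
          cases old with | nil => simp at hold | cons _ _ => simp
        have hlen : (List.drop old.length (c :: t)).length + 1 ≤ (c :: t).length := by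
          simp only [List.length_drop, List.length_cons]
          omega
        rcases ih (List.drop old.length (c :: t)) ([].reverse ++ acc) with h | h
        · rw [h]
          simp only [List.reverse_nil, List.nil_append, List.length_append,
            List.length_reverse, List.length_cons] at *
          omega
        · simp only [List.reverse_nil, List.nil_append, List.length_cons] at *
          omega
      · simp only [hpre, if_false, Bool.false_eq_true]
        rcases ih t (c :: acc) with h | h
        · left; rw [h]; simp
        · right; simp only [List.length_cons] at h ⊢; omega

theorem pvReplace_eq_or_lt (r pr : List Char) :
    PySem.Chars.replace r pr [] = r ∨ (PySem.Chars.replace r pr []).length < r.length := by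
  by_cases h : pr = []
  · left
    subst h
    simp [PySem.Chars.replace, List.flatMap]
    induction r with
    | nil => rfl
    | cons c t ih => simp [ih]
  · rw [PySem.Chars.replace]
    have : pr.isEmpty = false := by cases pr with | nil => simp at h | cons _ _ => rfl
    simp only [this, Bool.false_eq_true, if_false]
    rcases pvReplaceGo_eq_or_lt pr h r.length r [] with h' | h'
    · left; simpa using h'
    · right; simpa using h'

theorem pvFoldlReplace_eq_or_lt (ps : List (List Char)) :
    ∀ r : List Char,
      ps.foldl (fun reduced pr => PySem.Chars.replace reduced pr []) r = r ∨
      (ps.foldl (fun reduced pr => PySem.Chars.replace reduced pr []) r).length < r.length := by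
  induction ps with
  | nil => intro r; left; rfl
  | cons p0 rest ih =>
    intro r
    simp only [List.foldl_cons]
    rcases pvReplace_eq_or_lt r p0 with h | h
    · rw [h]; exact ih r
    · rcases ih (PySem.Chars.replace r p0 []) with h' | h'
      · right; rw [h']; exact h
      · right; omega

theorem pvPass_lt (p : List Char) (h : pvPass p ≠ p) : (pvPass p).length < p.length := by
  rcases pvFoldlReplace_eq_or_lt (PySem.Set.ofList (pvPairs p)) p with h' | h'
  · exact absurd h' h
  · exact h'

-- the while True loop: repeat the pass until reduced == '' or reduced == polymer
def pvLoop (p : List Char) : List Char :=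
  let reduced := pvPass p
  if reduced = [] ∨ reduced = p then reduced
  else pvLoop reduced
termination_by p.length
decreasing_by
  rename_i h
  push Not at h
  exact pvPass_lt p h.2

def reduce_polymer (polymer : String) : String :=
  String.ofList (pvLoop polymer.toList)

-- ===== PORT B =====
-- stack step: pop when the incoming unit reacts with the stack top, else push
def pvStep (stack : List Char) (c : Char) : List Char :=
  match stack with
  | [] => [c]
  | top :: rest => if pvReacts top c then rest else c :: top :: rest

def reduce_polymer_alt (polymer : String) : String :=
  String.ofList ((polymer.toList.foldl pvStep []).reverse)

-- ===== PRECONDITION & SPEC =====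
def Spec_reduce_polymer (polymer : String) (out : String) : Prop := out = reduce_polymer_alt polymer
instance (polymer : String) (out : String) : Decidable (Spec_reduce_polymer polymer out) := by unfold Spec_reduce_polymer; infer_instance

-- ===== CLAIM (what is proved, stated in full; the proofs are below) =====
def Claim_equal_reduce_polymer : Prop := ∀ (polymer : String), Dom_reduce_polymer polymer → Spec_reduce_polymer polymer (reduce_polymer polymer)

-- ===== LEMMAS AND PROOFS =====

-- normal form computed by the stack machine
def pvNF (l : List Char) : List Char := (l.foldl pvStep []).reverse

-- reaction test, unpacked to character level
theorem pvReacts_iff (a b : Char) :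
    pvReacts a b = true ↔
      (PySem.Chars.islower a = true ∧ PySem.Chars.upperChar a = b) ∨
      (PySem.Chars.isupper a = true ∧ PySem.Chars.lowerChar a = b) := by
  simp [pvReacts, PySem.Chars.upper, PySem.Chars.lower]

theorem pvCharLe_iff (a b : Char) : a ≤ b ↔ a.toNat ≤ b.toNat :=
  ⟨fun h => UInt32.le_iff_toNat_le.mp (Char.le_def.mp h),
   fun h => Char.le_def.mpr (UInt32.le_iff_toNat_le.mpr h)⟩

theorem pvIslower_iff (a : Char) : PySem.Chars.islower a = true ↔ 97 ≤ a.toNat ∧ a.toNat ≤ 122 := by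
  rw [PySem.Chars.islower]
  simp only [Bool.and_eq_true, decide_eq_true_eq, pvCharLe_iff]
  have h1 : ('a' : Char).toNat = 97 := by decide
  have h2 : ('z' : Char).toNat = 122 := by decide
  rw [h1, h2]

theorem pvIsupper_iff (a : Char) : PySem.Chars.isupper a = true ↔ 65 ≤ a.toNat ∧ a.toNat ≤ 90 := by
  rw [PySem.Chars.isupper]
  simp only [Bool.and_eq_true, decide_eq_true_eq, pvCharLe_iff]
  have h1 : ('A' : Char).toNat = 65 := by decide
  have h2 : ('Z' : Char).toNat = 90 := by decide
  rw [h1, h2]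

theorem pvToNat_ofNat (n : Nat) (h : n < 55000) : (Char.ofNat n).toNat = n := by
  have hv : n.isValidChar := Or.inl (by omega)
  rw [Char.toNat_ofNat, if_pos hv]

theorem pvUpperChar_toNat (a : Char) (h : PySem.Chars.islower a = true) :
    (PySem.Chars.upperChar a).toNat = a.toNat - 32 := by
  rw [PySem.Chars.upperChar, if_pos h]
  have hb := (pvIslower_iff a).1 h
  exact pvToNat_ofNat _ (by omega)

theorem pvLowerChar_toNat (a : Char) (h : PySem.Chars.isupper a = true) :
    (PySem.Chars.lowerChar a).toNat = a.toNat + 32 := by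
  rw [PySem.Chars.lowerChar, if_pos h]
  have hb := (pvIsupper_iff a).1 h
  exact pvToNat_ofNat _ (by omega)

theorem pvChar_eq_of_toNat (a b : Char) (h : a.toNat = b.toNat) : a = b :=
  Char.ext (UInt32.toNat_inj.mp h)

theorem pvReacts_symm (a b : Char) (h : pvReacts a b = true) : pvReacts b a = true := by
  rw [pvReacts_iff] at h ⊢
  rcases h with ⟨hl, hb⟩ | ⟨hu, hb⟩
  · right
    have hbnd := (pvIslower_iff a).1 hl
    have hbt : b.toNat = a.toNat - 32 := by rw [← hb]; exact pvUpperChar_toNat a hl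
    have hub : PySem.Chars.isupper b = true := (pvIsupper_iff b).2 (by omega)
    refine ⟨hub, ?_⟩
    apply pvChar_eq_of_toNat
    rw [pvLowerChar_toNat b hub]
    omega
  · left
    have hbnd := (pvIsupper_iff a).1 hu
    have hbt : b.toNat = a.toNat + 32 := by rw [← hb]; exact pvLowerChar_toNat a hu
    have hlb : PySem.Chars.islower b = true := (pvIslower_iff b).2 (by omega)
    refine ⟨hlb, ?_⟩
    apply pvChar_eq_of_toNat
    rw [pvUpperChar_toNat b hlb]
    omega

theorem pvReacts_fn (a b c : Char) (h1 : pvReacts a b = true) (h2 : pvReacts a c = true) : b = c := by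
  rw [pvReacts_iff] at h1 h2
  rcases h1 with ⟨hl, hb⟩ | ⟨hu, hb⟩ <;> rcases h2 with ⟨hl', hc⟩ | ⟨hu', hc⟩
  · rw [← hb, ← hc]
  · have b1 := (pvIslower_iff a).1 hl
    have b2 := (pvIsupper_iff a).1 hu'
    omega
  · have b1 := (pvIsupper_iff a).1 hu
    have b2 := (pvIslower_iff a).1 hl'
    omega
  · rw [← hb, ← hc]

-- stack invariant: no two adjacent stack entries react (below reacts-with top)
def pvIrr (st : List Char) : Prop := List.IsChain (fun top below => pvReacts below top = false) st

theorem pvStep_irr (st : List Char) (c : Char) (h : pvIrr st) : pvIrr (pvStep st c) := by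
  match st with
  | [] => simp [pvStep, pvIrr]
  | top :: rest =>
    rw [pvStep]
    by_cases hr : pvReacts top c = true
    · rw [if_pos hr]
      exact h.tail
    · rw [if_neg hr]
      exact h.cons (by simpa using hr)

theorem pvStep2 (st : List Char) (a b : Char) (hst : pvIrr st) (hab : pvReacts a b = true) :
    pvStep (pvStep st a) b = st := by
  match st with
  | [] => simp [pvStep, hab]
  | top :: rest =>
    rw [pvStep]
    by_cases hr : pvReacts top a = true
    · rw [if_pos hr]
      have htop : top = b := pvReacts_fn a top b (pvReacts_symm top a hr) hab
      match rest with
      | [] => rw [htop]; rfl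
      | u :: rest' =>
        rw [pvStep]
        have hut : pvReacts u top = false := (List.isChain_cons_cons.mp hst).1
        rw [htop] at hut
        rw [if_neg (by simp [hut]), htop]
    · rw [if_neg hr, pvStep, if_pos hab]

theorem pvFoldl_cancel (st : List Char) (a b : Char) (v : List Char)
    (hst : pvIrr st) (hab : pvReacts a b = true) :
    (a :: b :: v).foldl pvStep st = v.foldl pvStep st := by
  simp only [List.foldl_cons]
  rw [pvStep2 st a b hst hab]

-- simple recursive model of reduced.replace(a+b, '')
def pvRep2 (a b : Char) : List Char → List Char
  | x :: y :: t => if x = a ∧ y = b then pvRep2 a b t else x :: pvRep2 a b (y :: t)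
  | l => l

theorem pvRep2_len_le (a b : Char) (s : List Char) : (pvRep2 a b s).length ≤ s.length := by
  induction s using pvRep2.induct (a := a) (b := b) with
  | case1 x y t h ih => simp only [pvRep2, if_pos h]; simp only [List.length_cons]; omega
  | case2 x y t h ih => simp only [pvRep2, if_neg h]; simp only [List.length_cons] at *; omega
  | case3 l h => cases l with
    | nil => simp [pvRep2]
    | cons x t =>
      cases t with
      | nil => simp [pvRep2]
      | cons y t' => exact absurd rfl (h x y t')

theorem pvGo_rep2 (a b : Char) :
    ∀ (fuel : Nat) (l acc : List Char), l.length ≤ fuel →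
      PySem.Chars.replace.go [a, b] [] fuel l acc = acc.reverse ++ pvRep2 a b l := by
  intro fuel
  induction fuel with
  | zero =>
    intro l acc hl
    have : l = [] := List.length_eq_zero_iff.mp (by omega)
    subst this
    simp [PySem.Chars.replace.go, pvRep2]
  | succ n ih =>
    intro l acc hl
    match l with
    | [] => simp [PySem.Chars.replace.go, pvRep2]
    | [x] =>
      rw [PySem.Chars.replace.go]
      have hpre : ([a, b]).isPrefixOf [x] = false := by simp [List.isPrefixOf]
      rw [hpre]
      simp only [Bool.false_eq_true, if_false]
      rw [ih [] (x :: acc) (by simp)]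
      simp [pvRep2]
    | x :: y :: t =>
      rw [PySem.Chars.replace.go]
      by_cases hxy : x = a ∧ y = b
      · obtain ⟨hx, hy⟩ := hxy
        subst hx; subst hy
        have hpre : ([x, y]).isPrefixOf (x :: y :: t) = true := by simp [List.isPrefixOf]
        rw [hpre]
        simp only [if_true]
        have hdrop : List.drop ([x, y].length) (x :: y :: t) = t := by simp
        rw [hdrop, ih t _ (by simp at hl ⊢; omega)]
        simp [pvRep2]
      · have hpre : ([a, b]).isPrefixOf (x :: y :: t) = false := by
          simp only [List.isPrefixOf, Bool.and_true,
            Bool.and_eq_false_iff, beq_eq_false_iff_ne, ne_eq]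
          by_cases hx : x = a
          · right; intro hy; exact hxy ⟨hx, hy.symm⟩
          · left; intro hx'; exact hx hx'.symm
        rw [hpre]
        simp only [Bool.false_eq_true, if_false]
        rw [ih (y :: t) (x :: acc) (by simp at hl ⊢; omega)]
        simp only [pvRep2, if_neg hxy]
        simp

theorem pvReplace_eq_rep2 (a b : Char) (r : List Char) :
    PySem.Chars.replace r [a, b] [] = pvRep2 a b r := by
  rw [PySem.Chars.replace]
  simp only [List.isEmpty_cons, Bool.false_eq_true, if_false]
  exact pvGo_rep2 a b r.length r [] (le_refl _)

-- removing occurrences of a reacting pair does not change the stack-machine result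
theorem pvRep2_foldl (a b : Char) (hab : pvReacts a b = true) :
    ∀ s st, pvIrr st → (pvRep2 a b s).foldl pvStep st = s.foldl pvStep st := by
  intro s
  induction s using pvRep2.induct (a := a) (b := b) with
  | case1 x y t h ih =>
    intro st hst
    simp only [pvRep2, if_pos h]
    obtain ⟨hx, hy⟩ := h
    rw [ih st hst, hx, hy, ← pvFoldl_cancel st a b t hst hab]
  | case2 x y t h ih =>
    intro st hst
    simp only [pvRep2, if_neg h, List.foldl_cons]
    exact ih (pvStep st x) (pvStep_irr st x hst)
  | case3 l h =>
    intro st hst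
    cases l with
    | nil => rfl
    | cons x t =>
      cases t with
      | nil => rfl
      | cons y t' => exact absurd rfl (h x y t')

-- every pair in the pass's set is a reacting adjacent pair of p
theorem pvPairs_eq (p : List Char) :
    pvPairs p = ((p.dropLast.zip p.tail).filter (fun u => pvReacts u.1 u.2)).map (fun u => [u.1, u.2]) := by
  rw [pvPairs]
  rw [PySem.Chars.slice_eq_listSlice, PySem.Chars.slice_eq_listSlice,
    PySem.List.slice_to_neg_one, PySem.List.slice_from_one]
  rw [PySem.List.foldl_append_if (p := fun u : Char × Char => pvReacts u.1 u.2)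
    (f := fun u : Char × Char => [u.1, u.2])]
  simp

theorem pvMem_pairs (p : List Char) (pr : List Char) (h : pr ∈ PySem.Set.ofList (pvPairs p)) :
    ∃ a b, pr = [a, b] ∧ pvReacts a b = true := by
  rw [PySem.Set.mem_ofList] at h
  rw [pvPairs_eq] at h
  obtain ⟨u, hu, hpr⟩ := List.mem_map.mp h
  have := List.mem_filter.mp hu
  exact ⟨u.1, u.2, hpr.symm, by simpa using this.2⟩

-- one pass preserves the stack-machine result
theorem pvFoldlReplace_NF (ps : List (List Char)) :
    ∀ r : List Char, (∀ pr ∈ ps, ∃ a b, pr = [a, b] ∧ pvReacts a b = true) →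
      (ps.foldl (fun reduced pr => PySem.Chars.replace reduced pr []) r).foldl pvStep [] =
        r.foldl pvStep [] := by
  induction ps with
  | nil => intro r _; rfl
  | cons p0 rest ih =>
    intro r hsh
    obtain ⟨a, b, hp0, hab⟩ := hsh p0 (List.mem_cons_self)
    simp only [List.foldl_cons]
    rw [ih _ (fun pr hpr => hsh pr (List.mem_cons_of_mem _ hpr))]
    rw [hp0, pvReplace_eq_rep2]
    exact pvRep2_foldl a b hab r [] (by simp [pvIrr])

theorem pvPass_NF (p : List Char) : (pvPass p).foldl pvStep [] = p.foldl pvStep [] := by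
  exact pvFoldlReplace_NF _ p (fun pr hpr => pvMem_pairs p pr hpr)

-- adjacency decomposition
theorem pvZip_adj (p : List Char) (a b : Char) (h : (a, b) ∈ p.dropLast.zip p.tail) :
    ∃ u v, p = u ++ a :: b :: v := by
  induction p with
  | nil => simp at h
  | cons c t ih =>
    cases t with
    | nil => simp at h
    | cons d t' =>
      have hz : (c :: d :: t').dropLast.zip (c :: d :: t').tail =
          (c, d) :: (d :: t').dropLast.zip (d :: t').tail := by
        simp [List.dropLast_cons₂]
      rw [hz] at h
      rcases List.mem_cons.mp h with heq | hmem
      · have ha : a = c := congrArg Prod.fst heq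
        have hb : b = d := congrArg Prod.snd heq
        exact ⟨[], t', by simp [ha, hb]⟩
      · obtain ⟨u, v, huv⟩ := ih hmem
        exact ⟨c :: u, v, by rw [List.cons_append, ← huv]⟩

theorem pvRep2_occ_lt (a b : Char) (u v : List Char) :
    (pvRep2 a b (u ++ a :: b :: v)).length < (u ++ a :: b :: v).length := by
  induction u with
  | nil =>
    have h1 := pvRep2_len_le a b v
    simp only [List.nil_append, pvRep2, and_self, if_true, List.length_cons]
    omega
  | cons c u' ih =>
    rcases hw : u' ++ a :: b :: v with _ | ⟨w1, w2⟩
    · exact absurd hw (by simp)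
    · simp only [List.cons_append, hw, pvRep2]
      by_cases hc : c = a ∧ w1 = b
      · rw [if_pos hc]
        have h1 := pvRep2_len_le a b w2
        simp only [List.length_cons]
        omega
      · rw [if_neg hc]
        rw [hw] at ih
        simp only [List.length_cons] at ih ⊢
        omega

theorem pvSet_foldl_add_ext {α : Type} [BEq α] (t : List α) :
    ∀ acc : List α, ∃ ext, t.foldl PySem.Set.add acc = acc ++ ext := by
  induction t with
  | nil => intro acc; exact ⟨[], by simp⟩
  | cons y t' ih =>
    intro acc
    simp only [List.foldl_cons]
    obtain ⟨ext, hext⟩ := ih (PySem.Set.add acc y)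
    rw [hext, PySem.Set.add]
    by_cases hy : PySem.Set.contains acc y = true
    · rw [if_pos hy]; exact ⟨ext, rfl⟩
    · rw [if_neg hy]; exact ⟨y :: ext, by simp⟩

-- if some reacting adjacent pair exists, the pass strictly shortens the string
theorem pvPairs_ne_lt (p : List Char) (h : pvPairs p ≠ []) : (pvPass p).length < p.length := by
  rcases hps : pvPairs p with _ | ⟨pr0, rest⟩
  · exact absurd hps h
  · have hmem : pr0 ∈ pvPairs p := by rw [hps]; exact List.mem_cons_self
    rw [pvPairs_eq] at hmem
    obtain ⟨u0, hu0, hpr0⟩ := List.mem_map.mp hmem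
    have hflt := List.mem_filter.mp hu0
    obtain ⟨u, v, huv⟩ := pvZip_adj p u0.1 u0.2 (by simpa using hflt.1)
    rw [pvPass, hps]
    have hof : PySem.Set.ofList (pr0 :: rest) = rest.foldl PySem.Set.add [pr0] := by
      rw [PySem.Set.ofList_eq_foldl]
      rfl
    obtain ⟨ext, hext⟩ := pvSet_foldl_add_ext rest [pr0]
    rw [hof, hext]
    simp only [List.cons_append, List.nil_append, List.foldl_cons]
    have h1 : (PySem.Chars.replace p pr0 []).length < p.length := by
      rw [← hpr0, pvReplace_eq_rep2, huv]
      exact pvRep2_occ_lt u0.1 u0.2 u v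
    rcases pvFoldlReplace_eq_or_lt ext (PySem.Chars.replace p pr0 []) with h2 | h2
    · rw [h2]; exact h1
    · omega

-- an irreducible string is a fixpoint of the stack machine
theorem pvNoPair_foldl (p : List Char) (h : ∀ u ∈ p.dropLast.zip p.tail, pvReacts u.1 u.2 = false) :
    ∀ st : List Char,
      (∀ t c, st.head? = some t → p.head? = some c → pvReacts t c = false) →
      p.foldl pvStep st = p.reverse ++ st := by
  induction p with
  | nil => intro st _; simp
  | cons c t ih =>
    intro st hb
    have hstep : pvStep st c = c :: st := by
      cases st with
      | nil => rfl
      | cons top rest =>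
        rw [pvStep, if_neg]
        simp [hb top c rfl rfl]
    simp only [List.foldl_cons, hstep]
    have hadj : ∀ u ∈ t.dropLast.zip t.tail, pvReacts u.1 u.2 = false := by
      intro u hu
      apply h
      cases t with
      | nil => simp at hu
      | cons d t' =>
        simp only [List.dropLast_cons₂, List.tail_cons, List.zip_cons_cons]
        exact List.mem_cons_of_mem _ hu
    rw [ih hadj (c :: st) ?_]
    · simp
    · intro t0 c0 ht0 hc0
      simp only [List.head?_cons, Option.some.injEq] at ht0
      subst ht0
      cases t with
      | nil => simp at hc0
      | cons d t' =>
        simp only [List.head?_cons, Option.some.injEq] at hc0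
        subst hc0
        exact h (c, d) (by simp [List.dropLast_cons₂])

theorem pvLoop_eq_NF_aux : ∀ (n : Nat) (p : List Char), p.length ≤ n → pvLoop p = pvNF p := by
  intro n
  induction n with
  | zero =>
    intro p hp
    have hp0 : p = [] := List.length_eq_zero_iff.mp (by omega)
    subst hp0
    have h0 : pvPass ([] : List Char) = [] := by
      rcases pvFoldlReplace_eq_or_lt (PySem.Set.ofList (pvPairs [])) [] with h | h
      · exact h
      · simp at h
    rw [pvLoop]
    simp [h0, pvNF]
  | succ n ih =>
    intro p hp
    rw [pvLoop]
    by_cases hr : pvPass p = [] ∨ pvPass p = p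
    · rw [if_pos hr]
      rcases hr with hr | hr
      · have := pvPass_NF p
        rw [hr] at this
        simp only [List.foldl_nil] at this
        rw [hr, pvNF, ← this]
        rfl
      · have hpairs : pvPairs p = [] := by
          by_contra hne
          have := pvPairs_ne_lt p hne
          rw [hr] at this
          omega
        have hnp : ∀ u ∈ p.dropLast.zip p.tail, pvReacts u.1 u.2 = false := by
          intro u hu
          by_contra hc
          have hmem : u ∈ (p.dropLast.zip p.tail).filter (fun u => pvReacts u.1 u.2) :=
            List.mem_filter.mpr ⟨hu, by simpa using hc⟩
          rw [pvPairs_eq, List.map_eq_nil_iff] at hpairs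
          rw [hpairs] at hmem
          simp at hmem
        have := pvNoPair_foldl p hnp [] (by intro t c ht _; simp at ht)
        rw [hr, pvNF, this]
        simp
    · rw [if_neg hr]
      push Not at hr
      have hlt := pvPass_lt p hr.2
      rw [ih (pvPass p) (by omega)]
      rw [pvNF, pvNF, pvPass_NF p]

theorem pvLoop_eq_NF (p : List Char) : pvLoop p = pvNF p :=
  pvLoop_eq_NF_aux p.length p (le_refl _)

-- ===== VERDICT (by name: the statement is the Claim_ definition above) =====
theorem reduce_polymer_spec : Claim_equal_reduce_polymer := by
  intro polymer _
  unfold Spec_reduce_polymer reduce_polymer reduce_polymer_alt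
  rw [pvLoop_eq_NF]
  rfl
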